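-- pv_equiv track=rewrite | github.com/eic/EICrecon | src/tools/default_flags_table/gen_launch_script.py | has_unit_conversion
-- ===== SOURCE A (Python) =====
-- known_units_list = ['eV', 'MeV', 'GeV', 'mm', 'cm', 'mrad']
--
-- def has_unit_conversion(value):
--     for unit_name in known_units_list:
--         if f'*{unit_name}' in value or \
--            f'* {unit_name}' in value or \
--            f'/{unit_name}' in value or \
--            f'/ {unit_name}' in value:
--             return True
--     return False
-- ===== SOURCE B (Python) =====
-- known_units_list = ['eV', 'MeV', 'GeV', 'mm', 'cm', 'mrad']
--
-- _units_tuple = tuple(known_units_list)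
--
-- def has_unit_conversion(value):
--     # One left-to-right scan: at each '*' or '/', skip at most one space,
--     # then test whether a known unit starts right there.
--     for i, ch in enumerate(value):
--         if ch == '*' or ch == '/':
--             rest = value[i + 1:]
--             if rest.startswith(' '):
--                 rest = rest[1:]
--             if rest.startswith(_units_tuple):
--                 return True
--     return False
-- ===== Notes on version B (the rewrite author's own statement) =====
-- stated objective: alternative
-- what changed: Replaced the nested loop of four substring scans per unit (eight full 'in' scans of the string) with a single left-to-right scan that, at each multiplication/division operator character, skips at most one space and tests the known units as prefixes at that position.
import Mathlib
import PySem

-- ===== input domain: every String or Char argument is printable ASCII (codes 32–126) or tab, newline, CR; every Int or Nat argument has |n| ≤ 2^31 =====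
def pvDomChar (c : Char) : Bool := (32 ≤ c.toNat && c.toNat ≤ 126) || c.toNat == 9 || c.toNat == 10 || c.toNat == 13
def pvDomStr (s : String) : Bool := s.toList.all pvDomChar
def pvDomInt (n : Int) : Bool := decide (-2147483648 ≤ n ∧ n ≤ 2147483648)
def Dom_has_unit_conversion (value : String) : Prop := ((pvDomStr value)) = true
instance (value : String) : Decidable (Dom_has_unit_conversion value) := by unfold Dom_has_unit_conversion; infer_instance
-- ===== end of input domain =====

-- B replaces A's nested loop of four substring scans per unit by ONE left-to-right scan
-- of the string that, at each '*' or '/', skips at most one space and tests the units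
-- as prefixes right there (objective: alternative single-pass algorithm).

-- ===== PORT A =====
-- known_units_list (each f'*{unit}' etc. is '*' :: unit on the char-list level)
def knownUnitsList : List (List Char) :=
  [['e','V'], ['M','e','V'], ['G','e','V'], ['m','m'], ['c','m'], ['m','r','a','d']]

-- for-loop with early return True / final return False = List.any over the units
def has_unit_conversion (value : String) : Bool :=
  knownUnitsList.any fun u =>
    PySem.Chars.isIn ('*' :: u) value.toList ||
    PySem.Chars.isIn ('*' :: ' ' :: u) value.toList ||
    PySem.Chars.isIn ('/' :: u) value.toList ||
    PySem.Chars.isIn ('/' :: ' ' :: u) value.toList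

-- ===== PORT B =====
-- "if rest.startswith(' '): rest = rest[1:]"
def skipOneSpace : List Char → List Char
  | [] => []
  | c :: t => if c = ' ' then t else c :: t

-- "for i, ch in enumerate(value): …" as structural recursion on the character list:
-- at each position, test the head char and the units as prefixes of the (space-skipped) tail
def altGo : List Char → Bool
  | [] => false
  | c :: rest =>
    ((c == '*' || c == '/') &&
      knownUnitsList.any fun u => PySem.Chars.startswith (skipOneSpace rest) u)
    || altGo rest

def has_unit_conversion_alt (value : String) : Bool := altGo value.toList

-- ===== PRECONDITION & SPEC =====
def Spec_has_unit_conversion (value : String) (out : Bool) : Prop := out = has_unit_conversion_alt value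
instance (value : String) (out : Bool) : Decidable (Spec_has_unit_conversion value out) := by unfold Spec_has_unit_conversion; infer_instance

-- ===== CLAIM (what is proved, stated in full; the proofs are below) =====
def Claim_equal_has_unit_conversion : Prop := ∀ (value : String), Dom_has_unit_conversion value → Spec_has_unit_conversion value (has_unit_conversion value)

-- ===== LEMMAS AND PROOFS =====

-- A's four substring tests for one unit, bundled (abbreviation for the lemmas below)
def fourIsIn (u cs : List Char) : Bool :=
  PySem.Chars.isIn ('*' :: u) cs ||
  PySem.Chars.isIn ('*' :: ' ' :: u) cs ||
  PySem.Chars.isIn ('/' :: u) cs ||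
  PySem.Chars.isIn ('/' :: ' ' :: u) cs

-- at the head position: "one of the four patterns starts here" = "op char here, unit after optional space"
-- (needs that a unit is nonempty and does not start with a space)
lemma head_equiv (u : List Char) (hu : ∃ a t, u = a :: t ∧ a ≠ ' ')
    (c : Char) (cs : List Char) :
    (('*'::u <+: c::cs) ∨ ('*'::' '::u <+: c::cs) ∨ ('/'::u <+: c::cs) ∨ ('/'::' '::u <+: c::cs))
    ↔ ((c = '*' ∨ c = '/') ∧ u <+: skipOneSpace cs) := by
  obtain ⟨a, t, hu, ha⟩ := hu
  subst hu
  cases cs with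
  | nil =>
      simp [skipOneSpace, List.cons_prefix_cons]
  | cons d t2 =>
      by_cases hd : d = ' '
      · subst hd
        simp [skipOneSpace, List.cons_prefix_cons, ha]
        tauto
      · simp [skipOneSpace, hd, List.cons_prefix_cons, Ne.symm hd]
        tauto

-- one recursion step of A's four tests for a single unit
lemma fourIsIn_cons (u : List Char) (hu : ∃ a t, u = a :: t ∧ a ≠ ' ')
    (c : Char) (rest : List Char) :
    fourIsIn u (c :: rest) =
      (((c == '*' || c == '/') && PySem.Chars.startswith (skipOneSpace rest) u)
        || fourIsIn u rest) := by
  apply Bool.eq_iff_iff.mpr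
  simp only [fourIsIn, Bool.or_eq_true, Bool.and_eq_true, beq_iff_eq,
    PySem.Chars.isIn_iff_infix, PySem.Chars.startswith_iff, List.infix_cons_iff]
  have h := head_equiv u hu c rest
  tauto

lemma any_congr_mem {α : Type} (l : List α) (p q : α → Bool)
    (h : ∀ x ∈ l, p x = q x) : l.any p = l.any q := by
  induction l with
  | nil => rfl
  | cons a l ih =>
      simp only [List.any_cons, h a (List.mem_cons_self), ih (fun x hx => h x (List.mem_cons_of_mem a hx))]

lemma any_or_distrib {α : Type} (l : List α) (p q : α → Bool) :
    (l.any fun x => p x || q x) = (l.any p || l.any q) := by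
  induction l with
  | nil => rfl
  | cons a l ih => cases hp : p a <;> cases hq : q a <;> simp [List.any_cons, ih, hp, hq]

lemma any_and_left {α : Type} (l : List α) (h : Bool) (p : α → Bool) :
    (l.any fun x => h && p x) = (h && l.any p) := by
  cases h <;> simp

-- every known unit is nonempty and does not start with a space
lemma units_shape : ∀ u ∈ knownUnitsList, ∃ a t, u = a :: t ∧ a ≠ ' ' := by
  intro u hu
  fin_cases hu
  · exact ⟨'e', _, rfl, by decide⟩
  · exact ⟨'M', _, rfl, by decide⟩
  · exact ⟨'G', _, rfl, by decide⟩
  · exact ⟨'m', _, rfl, by decide⟩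
  · exact ⟨'c', _, rfl, by decide⟩
  · exact ⟨'m', _, rfl, by decide⟩

theorem key (cs : List Char) :
    (knownUnitsList.any fun u => fourIsIn u cs) = altGo cs := by
  induction cs with
  | nil => decide
  | cons c rest ih =>
      calc (knownUnitsList.any fun u => fourIsIn u (c :: rest))
          = (knownUnitsList.any fun u =>
              (((c == '*' || c == '/') && PySem.Chars.startswith (skipOneSpace rest) u)
                || fourIsIn u rest)) :=
            any_congr_mem _ _ _ (fun u hu => fourIsIn_cons u (units_shape u hu) c rest)
        _ = ((knownUnitsList.any fun u =>
              (c == '*' || c == '/') && PySem.Chars.startswith (skipOneSpace rest) u)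
              || knownUnitsList.any fun u => fourIsIn u rest) := any_or_distrib _ _ _
        _ = (((c == '*' || c == '/') &&
              knownUnitsList.any fun u => PySem.Chars.startswith (skipOneSpace rest) u)
              || altGo rest) := by rw [any_and_left, ih]
        _ = altGo (c :: rest) := rfl

-- ===== VERDICT (by name: the statement is the Claim_ definition above) =====
theorem has_unit_conversion_spec : Claim_equal_has_unit_conversion := by
  intro value _
  unfold Spec_has_unit_conversion has_unit_conversion has_unit_conversion_alt
  rw [← key value.toList]
  rfl
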